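-- pv_equiv track=rewrite | github.com/CenterForCollectiveLearning/DIVE-backend | dive/worker/statistics/comparison.py | find_unique_values_and_max_frequency
-- ===== SOURCE A (Python) =====
-- def find_unique_values_and_max_frequency(list):
--     '''
--     helper function to find the number of unique values in the list and the maximum
--     frequency that an unique value has
--     list: represents the list being analyzed
--     '''
--     seen = {}
--     max = 0
--     for val in list:
--         if seen.get(val):
--             seen[val] += 1
--             if seen[val] > max:
--                 max = seen[val]
--         else:
--             seen[val] = 1
--     return (len(seen), max)
-- ===== SOURCE B (Python) =====
-- def find_unique_values_and_max_frequency(list):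
--     '''
--     helper function to find the number of unique values in the list and the maximum
--     frequency that an unique value has
--     list: represents the list being analyzed
--     '''
--     s = sorted(list)
--     runs = 0       # number of distinct values = number of runs of equal elements
--     best = 0       # longest run length
--     cur = 0        # length of the current run
--     prev = 0
--     for v in s:
--         if runs and v == prev:
--             cur += 1
--         else:
--             runs += 1
--             cur = 1
--             prev = v
--         if cur > best:
--             best = cur
--     return (runs, best if best > 1 else 0)
-- ===== Notes on version B (the rewrite author's own statement) =====
-- stated objective: alternative
-- what changed: Replaces A's hash-table pass (dict of counts with an inline running max) by a sort-then-scan algorithm: sort the list so equal values are adjacent, then one linear scan counts runs of equal elements and the longest run; the max frequency is reported as 0 when no value repeats, as A reports.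
import Mathlib
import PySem

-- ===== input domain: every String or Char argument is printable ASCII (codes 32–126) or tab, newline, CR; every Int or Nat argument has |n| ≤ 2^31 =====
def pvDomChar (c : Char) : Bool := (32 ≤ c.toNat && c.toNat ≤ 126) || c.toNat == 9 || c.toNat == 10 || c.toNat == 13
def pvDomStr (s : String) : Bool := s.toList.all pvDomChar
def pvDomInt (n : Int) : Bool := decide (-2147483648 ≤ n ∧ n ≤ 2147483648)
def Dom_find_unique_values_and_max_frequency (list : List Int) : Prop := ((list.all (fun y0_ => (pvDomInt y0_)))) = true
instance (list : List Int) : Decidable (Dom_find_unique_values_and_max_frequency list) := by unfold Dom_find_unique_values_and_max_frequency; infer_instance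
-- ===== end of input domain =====

-- B replaces A's dict pass (counts with an inline running max) by sort-then-scan: sort, then one linear scan counting runs of equal elements and the longest run (reported as 0 when no value repeats, as A reports).


-- ===== PORT A =====
-- A's single pass: dict `seen` and running `max`, both updated inline per element.
def find_unique_values_and_max_frequency (list : List Int) : Int × Int :=
  let st := list.foldl (fun (s : PySem.Dict Int Int × Int) val =>
    match s.1.get? val with
    | some c =>
      -- `if seen.get(val):` — truthy = key present with a nonzero count
      if c ≠ 0 then
        let c' := c + 1
        let d := s.1.insert val c'
        if c' > s.2 then (d, c') else (d, s.2)
      else (s.1.insert val 1, s.2)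
    | none => (s.1.insert val 1, s.2)) (PySem.Dict.empty, 0)
  ((PySem.Dict.size st.1 : Int), st.2)

-- ===== PORT B =====
-- B: sort the list so equal values are adjacent, then one scan over the sorted list
-- counting runs of equal elements (`runs`), the current run (`cur`, with `prev` its value)
-- and the longest run (`best`); report `best if best > 1 else 0` like Source B.
-- pvStepB is the body of Source B's for-loop over the sorted list (state runs, best, cur, prev).
def pvStepB (st : Int × Int × Int × Int) (v : Int) : Int × Int × Int × Int :=
  let runs := st.1; let best := st.2.1; let cur := st.2.2.1; let prev := st.2.2.2
  let rcp : Int × Int × Int :=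
    if runs ≠ 0 ∧ v = prev then (runs, cur + 1, prev)
    else (runs + 1, 1, v)
  if rcp.2.1 > best then (rcp.1, rcp.2.1, rcp.2.1, rcp.2.2)
  else (rcp.1, best, rcp.2.1, rcp.2.2)

def find_unique_values_and_max_frequency_alt (list : List Int) : Int × Int :=
  let s := PySem.List.sorted list (fun x => x) false
  let st := s.foldl pvStepB (0, 0, 0, 0)
  (st.1, if st.2.1 > 1 then st.2.1 else 0)

-- ===== PRECONDITION & SPEC =====
def Spec_find_unique_values_and_max_frequency (list : List Int) (out : Int × Int) : Prop := out = find_unique_values_and_max_frequency_alt list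
instance (list : List Int) (out : Int × Int) : Decidable (Spec_find_unique_values_and_max_frequency list out) := by unfold Spec_find_unique_values_and_max_frequency; infer_instance

-- ===== CLAIM (what is proved, stated in full; the proofs are below) =====
def Claim_equal_find_unique_values_and_max_frequency : Prop := ∀ (list : List Int), Dom_find_unique_values_and_max_frequency list → Spec_find_unique_values_and_max_frequency list (find_unique_values_and_max_frequency list)

-- ===== LEMMAS AND PROOFS =====

-- the maximum multiplicity occurring in `l`, as an Int (0 on the empty list)
def pvMaxCount (l : List Int) : Int :=
  ((PySem.Set.ofList l).map (fun v => (l.count v : Int))).foldl max 0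

theorem pvMaxCount_nonneg (l : List Int) : 0 ≤ pvMaxCount l :=
  (PySem.List.le_foldl_max _ 0).1

theorem pvMaxCount_le (l : List Int) (v : Int) : (l.count v : Int) ≤ pvMaxCount l := by
  by_cases hv : v ∈ l
  · exact (PySem.List.le_foldl_max _ 0).2 _ (List.mem_map.mpr ⟨v, (PySem.Set.mem_ofList l v).mpr hv, rfl⟩)
  · simp [List.count_eq_zero_of_not_mem hv]
    exact pvMaxCount_nonneg l

theorem pvMaxCount_attained (l : List Int) :
    pvMaxCount l = 0 ∨ ∃ v ∈ l, pvMaxCount l = (l.count v : Int) := by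
  rcases PySem.List.foldl_max_mem ((PySem.Set.ofList l).map (fun v => (l.count v : Int))) 0 with h | h
  · exact Or.inl h
  · rcases List.mem_map.mp h with ⟨v, hv, hev⟩
    exact Or.inr ⟨v, (PySem.Set.mem_ofList l v).mp hv, hev.symm⟩

theorem pvMaxCount_pos (l : List Int) (h : l ≠ []) : 1 ≤ pvMaxCount l := by
  cases l with
  | nil => exact absurd rfl h
  | cons a t =>
    have : (1 : Int) ≤ ((a :: t).count a : Int) := by
      have := List.one_le_count_iff.mpr (List.mem_cons_self (a := a) (l := t))
      exact_mod_cast this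
    exact le_trans this (pvMaxCount_le _ a)

-- appending one element: the max multiplicity is the old one joined with the new count of x
theorem pvMaxCount_append (l : List Int) (x : Int) :
    pvMaxCount (l ++ [x]) = max (pvMaxCount l) (((l ++ [x]).count x : Int)) := by
  have hxle : (((l ++ [x]).count x : Int)) ≤ pvMaxCount (l ++ [x]) := pvMaxCount_le _ x
  have hMle : pvMaxCount l ≤ pvMaxCount (l ++ [x]) := by
    rcases pvMaxCount_attained l with h | ⟨v, hv, hev⟩
    · rw [h]; exact pvMaxCount_nonneg _
    · calc pvMaxCount l = (l.count v : Int) := hev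
        _ ≤ ((l ++ [x]).count v : Int) := by
            simp [List.count_append]
        _ ≤ pvMaxCount (l ++ [x]) := pvMaxCount_le _ v
  have hup : pvMaxCount (l ++ [x]) ≤ max (pvMaxCount l) (((l ++ [x]).count x : Int)) := by
    rcases pvMaxCount_attained (l ++ [x]) with h | ⟨v, hv, hev⟩
    · rw [h]; exact le_max_of_le_left (pvMaxCount_nonneg l)
    · rw [hev]
      by_cases hvx : v = x
      · subst hvx; exact le_max_right _ _
      · have : ((l ++ [x]).count v : Int) = (l.count v : Int) := by
          simp [List.count_append, Ne.symm hvx]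
        rw [this]
        exact le_max_of_le_left (pvMaxCount_le l v)
  omega

-- pvMaxCount only depends on the multiset of elements
theorem pvMaxCount_perm (l l' : List Int) (h : l.Perm l') : pvMaxCount l = pvMaxCount l' := by
  have hle : ∀ (a b : List Int), a.Perm b → pvMaxCount a ≤ pvMaxCount b := by
    intro a b hab
    rcases pvMaxCount_attained a with h0 | ⟨v, _, hev⟩
    · rw [h0]; exact pvMaxCount_nonneg b
    · rw [hev, hab.count_eq v]; exact pvMaxCount_le b v
  exact le_antisymm (hle l l' h) (hle l' l h.symm)

theorem get?_counter_mem (l : List Int) (x : Int) (hx : x ∈ l) :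
    (PySem.Dict.counter l).get? x = some ((l.count x : Int)) := by
  apply PySem.Dict.get?_of_mem_items _ _ (PySem.Dict.nodup_keys_counter l)
  rw [PySem.Dict.items_counter]
  exact List.mem_map.mpr ⟨x, (PySem.Set.mem_ofList l x).mpr hx, rfl⟩

theorem get?_counter_not_mem (l : List Int) (x : Int) (hx : x ∉ l) :
    (PySem.Dict.counter l).get? x = none := by
  rw [PySem.Dict.get?_eq_none_iff_not_mem_keys, PySem.Dict.keys_counter]
  exact fun h => hx ((PySem.Set.mem_ofList l x).mp h)

-- A's loop state: the dict is Counter(l) and the running max is pvMaxCount l clamped to 0 when ≤ 1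
theorem stateA_eq (l : List Int) :
    l.foldl (fun (s : PySem.Dict Int Int × Int) val =>
      match s.1.get? val with
      | some c =>
        if c ≠ 0 then
          let c' := c + 1
          let d := s.1.insert val c'
          if c' > s.2 then (d, c') else (d, s.2)
        else (s.1.insert val 1, s.2)
      | none => (s.1.insert val 1, s.2)) (PySem.Dict.empty, 0)
    = (PySem.Dict.counter l, if 1 < pvMaxCount l then pvMaxCount l else 0) := by
  induction l using List.reverseRecOn with
  | nil => rfl
  | append_singleton l x ih =>
    rw [List.foldl_append, ih, List.foldl_cons, List.foldl_nil]
    have hM0 : (0:Int) ≤ pvMaxCount l := pvMaxCount_nonneg l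
    have hMA := pvMaxCount_append l x
    by_cases hx : x ∈ l
    · have hget := get?_counter_mem l x hx
      have hc1 : 1 ≤ l.count x := List.one_le_count_iff.mpr hx
      have hcx : ((l ++ [x]).count x : Int) = (l.count x : Int) + 1 := by
        simp [List.count_append]
      have hdict : (PySem.Dict.counter l).insert x ((l.count x : Int) + 1)
          = PySem.Dict.counter (l ++ [x]) := by
        rw [PySem.Dict.counter_append_singleton]
        have h0 : (PySem.Dict.counter l).getD x 0 = (l.count x : Int) := PySem.Dict.getD_counter l x
        show _ = (PySem.Dict.counter l).insert x ((PySem.Dict.counter l).getD x 0 + 1)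
        rw [h0]
      have hcle : (l.count x : Int) ≤ pvMaxCount l := pvMaxCount_le l x
      simp only [hget]
      have hne : ((l.count x : Int)) ≠ 0 := by exact_mod_cast Nat.one_le_iff_ne_zero.mp hc1
      simp only [hne, if_pos, ne_eq, not_false_eq_true]
      rw [hdict]
      by_cases hgt : (l.count x : Int) + 1 > (if 1 < pvMaxCount l then pvMaxCount l else 0)
      · simp only [hgt, if_true]
        congr 1
        omega
      · simp only [hgt, if_false]
        congr 1
        omega
    · have hget := get?_counter_not_mem l x hx
      have hcx : ((l ++ [x]).count x : Int) = 1 := by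
        simp [List.count_append, List.count_eq_zero_of_not_mem hx]
      have hdict : (PySem.Dict.counter l).insert x 1 = PySem.Dict.counter (l ++ [x]) := by
        rw [PySem.Dict.counter_append_singleton]
        have h0 : (PySem.Dict.counter l).getD x 0 = (l.count x : Int) := PySem.Dict.getD_counter l x
        show _ = (PySem.Dict.counter l).insert x ((PySem.Dict.counter l).getD x 0 + 1)
        rw [h0, List.count_eq_zero_of_not_mem hx]
        norm_num
      simp only [hget]
      rw [hdict]
      congr 1
      omega

-- getLastD on a list extended by one element
theorem pvGetLastD_append (l : List Int) (x : Int) : ∀ (d : Int), (l ++ [x]).getLastD d = x := by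
  induction l with
  | nil => intro d; rfl
  | cons a t ih => intro d; simp only [List.cons_append, List.getLastD_cons]; exact ih a

theorem pvGetLastD_mem (l : List Int) (h : l ≠ []) (d : Int) : l.getLastD d ∈ l := by
  induction l using List.reverseRecOn with
  | nil => exact absurd rfl h
  | append_singleton t x _ => rw [pvGetLastD_append]; simp

-- in a ≤-sorted list every element is ≤ the last one
theorem le_getLastD_of_sorted (t : List Int) (h : t.Pairwise (· ≤ ·))
    (y : Int) (hy : y ∈ t) (d : Int) : y ≤ t.getLastD d := by
  induction t using List.reverseRecOn with
  | nil => simp at hy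
  | append_singleton l x _ =>
    rw [pvGetLastD_append]
    rcases List.mem_append.mp hy with hy' | hy'
    · exact (List.pairwise_append.mp h).2.2 y hy' x (by simp)
    · simp at hy'; omega

-- pvStepB written out on a destructured state
theorem pvStepB_eq (runs best cur prev v : Int) :
    pvStepB (runs, best, cur, prev) v
    = if runs ≠ 0 ∧ v = prev then
        (if cur + 1 > best then (runs, cur + 1, cur + 1, prev) else (runs, best, cur + 1, prev))
      else (if 1 > best then (runs + 1, 1, 1, v) else (runs + 1, best, 1, v)) := by
  by_cases hC : runs ≠ 0 ∧ v = prev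
  · simp [pvStepB, hC]
  · simp [pvStepB, hC]

-- B's scan invariant over a nonempty ≤-sorted list
theorem stateB_eq (t : List Int) (h : t.Pairwise (· ≤ ·)) (ht : t ≠ []) :
    t.foldl pvStepB (0, 0, 0, 0)
    = ((t.toFinset.card : Int), pvMaxCount t, (t.count (t.getLastD 0) : Int), t.getLastD 0) := by
  induction t using List.reverseRecOn with
  | nil => exact absurd rfl ht
  | append_singleton l x ih =>
    have hpl : l.Pairwise (· ≤ ·) := (List.pairwise_append.mp h).1
    have hle : ∀ y ∈ l, y ≤ x := by
      intro y hy
      exact (List.pairwise_append.mp h).2.2 y hy x (by simp)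
    have hlast : (l ++ [x]).getLastD 0 = x := pvGetLastD_append l x 0
    rw [List.foldl_append, List.foldl_cons, List.foldl_nil]
    cases hl : l with
    | nil =>
      subst hl
      simp only [List.nil_append, List.foldl_nil]
      have hm1 : pvMaxCount [x] = 1 := by
        have h1 : ([x].count x : Int) = 1 := by simp
        have := pvMaxCount_le [x] x
        rcases pvMaxCount_attained [x] with h0 | ⟨v, hv, hev⟩
        · omega
        · simp at hv; subst hv; omega
      have hgl : ([x] : List Int).getLastD 0 = x := rfl
      simp [pvStepB, hm1]
    | cons a s =>
      rw [← hl]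
      have hlne : l ≠ [] := by rw [hl]; simp
      rw [ih hpl hlne]
      have hp := pvGetLastD_mem l hlne 0
      have hcard1 : 1 ≤ l.toFinset.card := Finset.card_pos.mpr ⟨_, List.mem_toFinset.mpr hp⟩
      have hMA := pvMaxCount_append l x
      have hM1 : 1 ≤ pvMaxCount l := pvMaxCount_pos l hlne
      have hrne : ((l.toFinset.card : Int)) ≠ 0 := by push_cast; omega
      rw [pvStepB_eq, hlast]
      by_cases hxp : x = l.getLastD 0
      · -- x extends the last run of the sorted prefix
        have hxmem : x ∈ l := hxp ▸ hp
        have hgl : l.getLastD 0 = x := hxp.symm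
        have hcx : ((l ++ [x]).count x : Int) = (l.count x : Int) + 1 := by
          simp [List.count_append]
        have hfin : (l ++ [x]).toFinset = l.toFinset := by
          simp [List.toFinset_append]
          exact hxmem
        rw [hgl, hfin, if_pos ⟨hrne, rfl⟩]
        split_ifs with hgt <;> simp only [Prod.mk.injEq, true_and, and_true] <;>
          exact ⟨by omega, by omega⟩
      · -- x starts a new run
        have hxnot : x ∉ l := fun hxl =>
          hxp (le_antisymm (le_getLastD_of_sorted l hpl x hxl 0) (hle _ hp))
        have hcx : ((l ++ [x]).count x : Int) = 1 := by
          simp [List.count_append, List.count_eq_zero_of_not_mem hxnot]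
        have hfin : ((l ++ [x]).toFinset.card : Int) = (l.toFinset.card : Int) + 1 := by
          rw [List.toFinset_append]
          simp only [List.toFinset_cons, List.toFinset_nil, insert_empty_eq]
          rw [Finset.union_comm, ← Finset.insert_eq,
            Finset.card_insert_of_notMem (fun hc => hxnot (List.mem_toFinset.mp hc))]
          push_cast
          ring
        rw [if_neg (fun hc => hxp hc.2), if_neg (by omega : ¬((1:Int) > pvMaxCount l))]
        simp only [Prod.mk.injEq, and_true]
        exact ⟨by omega, by omega, by omega⟩

-- number of distinct values: Counter's size is the toFinset card
theorem counter_size_eq (l : List Int) :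
    ((PySem.Dict.counter l).size : Int) = (l.toFinset.card : Int) := by
  have hlen : (PySem.Dict.counter l).size = (PySem.Set.ofList l).length := by
    show (PySem.Dict.counter l).items.length = _
    rw [PySem.Dict.items_counter, List.length_map]
  have hnodup := PySem.Set.nodup_ofList (xs := l)
  have hfs : (PySem.Set.ofList l).toFinset = l.toFinset := by
    apply Finset.ext
    intro a
    simp only [List.mem_toFinset]
    exact PySem.Set.mem_ofList l a
  have hall : (PySem.Dict.counter l).size = l.toFinset.card := by
    rw [hlen, ← List.toFinset_card_of_nodup hnodup, hfs]
  exact_mod_cast hall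

theorem ports_agree (l : List Int) :
    find_unique_values_and_max_frequency l = find_unique_values_and_max_frequency_alt l := by
  unfold find_unique_values_and_max_frequency find_unique_values_and_max_frequency_alt
  rw [stateA_eq]
  by_cases hl : l = []
  · subst hl; rfl
  · have hperm : (PySem.List.sorted l (fun x => x) false).Perm l := PySem.List.sorted_perm ..
    have htne : PySem.List.sorted l (fun x => x) false ≠ [] := by
      intro hnil
      exact hl ((PySem.List.sorted_eq_nil_iff l (fun x => x) false).mp hnil)
    have hpw : (PySem.List.sorted l (fun x => x) false).Pairwise (· ≤ ·) :=
      PySem.List.sorted_pairwise ..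
    have hfold := stateB_eq (PySem.List.sorted l (fun x => x) false) hpw htne
    have hfs : (PySem.List.sorted l (fun x => x) false).toFinset = l.toFinset := by
      apply Finset.ext
      intro a
      simp only [List.mem_toFinset]
      exact hperm.mem_iff
    have hmc : pvMaxCount (PySem.List.sorted l (fun x => x) false) = pvMaxCount l :=
      pvMaxCount_perm _ _ hperm
    simp only [hfold, counter_size_eq, hfs, hmc, gt_iff_lt]

-- ===== VERDICT (by name: the statement is the Claim_ definition above) =====
theorem find_unique_values_and_max_frequency_spec : Claim_equal_find_unique_values_and_max_frequency := by
  intro l _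
  unfold Spec_find_unique_values_and_max_frequency
  exact ports_agree l
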